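-- pv_equiv track=rewrite | github.com/rileypsmith/History-Transformer | scraper.py | fix_punctuation
-- ===== SOURCE A (Python) =====
-- import string
--
-- def fix_punctuation(text):
--     """Replace punctuation with tokens. Remove others."""
--     mapping = {
--         '.': ' <.>',
--         ',': ' <,>',
--         '!': ' <.>',
--         '<': '<',
--         '>': '>',
--         '-': ' '
--     }
--     for punc in string.punctuation:
--         if not punc in mapping:
--             mapping[punc] = ''
--     for find, replace in mapping.items():
--         text = text.replace(find, replace)
--     # Convert to all lowercase as well
--     text = text.lower()
--     return text
-- ===== SOURCE B (Python) =====
-- import string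
--
-- def fix_punctuation(text):
--     """Replace punctuation with tokens. Remove others. One pass over the text."""
--     tokens = {
--         '.': ' <.>',
--         ',': ' <,>',
--         '!': ' <.>',
--         '<': '<',
--         '>': '>',
--         '-': ' '
--     }
--     out = []
--     for ch in text:
--         if ch in tokens:
--             out.append(tokens[ch])
--         elif ch not in string.punctuation:
--             out.append(ch)
--     return ''.join(out).lower()
-- ===== Notes on version B (the rewrite author's own statement) =====
-- stated objective: alternative
-- what changed: A makes 32 sequential full-text str.replace passes (one per punctuation mapping entry); B makes a single character-by-character pass, appending each character's token/replacement (or dropping it) and joining once, then lowercasing.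
import Mathlib
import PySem

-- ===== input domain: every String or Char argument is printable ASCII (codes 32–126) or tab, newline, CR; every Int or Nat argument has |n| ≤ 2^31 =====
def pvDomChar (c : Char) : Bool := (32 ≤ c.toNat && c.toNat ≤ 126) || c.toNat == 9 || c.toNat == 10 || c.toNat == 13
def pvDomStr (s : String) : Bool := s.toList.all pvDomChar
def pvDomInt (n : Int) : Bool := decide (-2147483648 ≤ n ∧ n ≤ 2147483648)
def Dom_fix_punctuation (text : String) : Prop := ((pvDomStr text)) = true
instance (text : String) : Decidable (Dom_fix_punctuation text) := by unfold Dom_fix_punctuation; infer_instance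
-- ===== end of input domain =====

-- ===== PORT A =====
-- B replaces A's 32 sequential full-text `str.replace` passes with a single
-- character-by-character pass over the text (objective: alternative decomposition).
def fix_punctuation (text : String) : String :=
  -- mapping = {...} (dict literal, insertion order)
  let mapping : PySem.Dict String String := PySem.Dict.mk
    [(".", " <.>"), (",", " <,>"), ("!", " <.>"), ("<", "<"), (">", ">"), ("-", " ")]
  -- for punc in string.punctuation: if not punc in mapping: mapping[punc] = ''
  let mapping := ("!\"#$%&'()*+,-./:;<=>?@[\\]^_`{|}~" : String).toList.foldl
    (fun m p => if (m.get? (String.singleton p)).isSome then m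
                else m.insert (String.singleton p) "") mapping
  -- for find, replace in mapping.items(): text = text.replace(find, replace)
  let text := mapping.items.foldl (fun t pr => PySem.Str.replace t pr.1 pr.2) text
  -- text = text.lower()
  PySem.Str.lower text

-- ===== PORT B =====
def fix_punctuation_alt (text : String) : String :=
  -- tokens = {...} (dict literal)
  let tokens : PySem.Dict Char String := PySem.Dict.mk
    [('.', " <.>"), (',', " <,>"), ('!', " <.>"), ('<', "<"), ('>', ">"), ('-', " ")]
  -- out = []; for ch in text: append tokens[ch] / skip punctuation / append ch; ''.join(out)
  let out : List Char := text.toList.flatMap (fun ch =>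
    match tokens.get? ch with
    | some r => r.toList
    | none => if ("!\"#$%&'()*+,-./:;<=>?@[\\]^_`{|}~" : String).toList.contains ch then [] else [ch])
  -- return ''.join(out).lower()
  PySem.Str.lower (String.ofList out)

-- ===== PRECONDITION & SPEC =====
def Spec_fix_punctuation (text : String) (out : String) : Prop := out = fix_punctuation_alt text
instance (text : String) (out : String) : Decidable (Spec_fix_punctuation text out) := by unfold Spec_fix_punctuation; infer_instance

-- ===== CLAIM (what is proved, stated in full; the proofs are below) =====
def Claim_equal_fix_punctuation : Prop := ∀ (text : String), Dom_fix_punctuation text → Spec_fix_punctuation text (fix_punctuation text)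

-- ===== LEMMAS AND PROOFS =====

-- per-character effect of a sequence of single-character replacements, in order
def pvChain : List (Char × List Char) → Char → List Char
  | [], c => [c]
  | (a, rep) :: rest, c => (if c = a then rep else [c]).flatMap (pvChain rest)

-- the 32 (find, replace) pairs of A's mapping, as (char, replacement-chars)
def pvPairs : List (Char × List Char) :=
  [('.', " <.>".toList),
   (',', " <,>".toList),
   ('!', " <.>".toList),
   ('<', "<".toList),
   ('>', ">".toList),
   ('-', " ".toList),
   ('"', "".toList),
   ('#', "".toList),
   ('$', "".toList),
   ('%', "".toList),
   ('&', "".toList),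
   ('\'', "".toList),
   ('(', "".toList),
   (')', "".toList),
   ('*', "".toList),
   ('+', "".toList),
   ('/', "".toList),
   (':', "".toList),
   (';', "".toList),
   ('=', "".toList),
   ('?', "".toList),
   ('@', "".toList),
   ('[', "".toList),
   ('\\', "".toList),
   (']', "".toList),
   ('^', "".toList),
   ('_', "".toList),
   ('`', "".toList),
   ('{', "".toList),
   ('|', "".toList),
   ('}', "".toList),
   ('~', "".toList)]

-- single-character str.replace is a flatMap over the characters
lemma pv_go_single (a : Char) (rep : List Char) :
    ∀ (l : List Char) (fuel : Nat) (acc : List Char), l.length ≤ fuel →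
      PySem.Chars.replace.go [a] rep fuel l acc
        = acc.reverse ++ l.flatMap (fun c => if c = a then rep else [c]) := by
  intro l
  induction l with
  | nil => intro fuel acc _; cases fuel <;> simp [PySem.Chars.replace.go]
  | cons c t ih =>
    intro fuel acc hle
    cases fuel with
    | zero => simp at hle
    | succ fuel =>
      rw [PySem.Chars.replace.go]
      by_cases hc : c = a
      · subst hc
        simp [List.isPrefixOf, ih fuel _ (by simpa using hle)]
      · have : ([a].isPrefixOf (c :: t)) = false := by
          simp [List.isPrefixOf]; exact fun h => absurd h.symm hc
        simp [this, hc, ih fuel _ (by simpa using hle)]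

lemma pv_replace_single (s : List Char) (a : Char) (rep : List Char) :
    PySem.Chars.replace s [a] rep = s.flatMap (fun c => if c = a then rep else [c]) := by
  rw [PySem.Chars.replace]
  simp [pv_go_single a rep s s.length [] (le_refl _)]

-- folding single-char replaces over pairs = one flatMap of the chained per-char map
lemma pv_foldl_replace (prs : List (String × String)) (cs : List (Char × List Char))
    (h : prs.map (fun pr => (pr.1.toList, pr.2.toList)) = cs.map (fun pr => ([pr.1], pr.2)))
    (t : String) :
    (prs.foldl (fun t pr => PySem.Str.replace t pr.1 pr.2) t).toList
      = t.toList.flatMap (pvChain cs) := by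
  induction cs generalizing prs t with
  | nil =>
    have : prs = [] := by cases prs <;> simp_all
    subst this; simp [pvChain]
  | cons p rest ih =>
    cases prs with
    | nil => simp at h
    | cons q qs =>
      simp only [List.map_cons, List.cons.injEq, Prod.mk.injEq] at h
      obtain ⟨⟨h1, h2⟩, h3⟩ := h
      simp only [List.foldl_cons]
      rw [ih qs h3]
      simp [PySem.Str.toList_replace, h1, h2, pv_replace_single, pvChain,
        List.flatMap_assoc]

-- A's completed mapping has exactly these 32 items
set_option maxRecDepth 4000 in
lemma pv_items : ((("!\"#$%&'()*+,-./:;<=>?@[\\]^_`{|}~" : String).toList.foldl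
    (fun (m : PySem.Dict String String) p =>
      if (m.get? (String.singleton p)).isSome then m
      else m.insert (String.singleton p) "")
    (PySem.Dict.mk
      [(".", " <.>"), (",", " <,>"), ("!", " <.>"), ("<", "<"), (">", ">"), ("-", " ")])).items)
    = [(".", " <.>"), (",", " <,>"), ("!", " <.>"), ("<", "<"), (">", ">"), ("-", " "), ("\"", ""), ("#", ""), ("$", ""), ("%", ""), ("&", ""), ("'", ""), ("(", ""), (")", ""), ("*", ""), ("+", ""), ("/", ""), (":", ""), (";", ""), ("=", ""), ("?", ""), ("@", ""), ("[", ""), ("\\", ""), ("]", ""), ("^", ""), ("_", ""), ("`", ""), ("{", ""), ("|", ""), ("}", ""), ("~", "")] := by decide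

-- the chained 32-step per-char map equals B's per-char map, for every character
lemma pv_pointwise (c : Char) :
    pvChain pvPairs c
      = (match (PySem.Dict.mk
            [('.', " <.>"), (',', " <,>"), ('!', " <.>"), ('<', "<"), ('>', ">"), ('-', " ")]
            : PySem.Dict Char String).get? c with
        | some r => r.toList
        | none => if ("!\"#$%&'()*+,-./:;<=>?@[\\]^_`{|}~" : String).toList.contains c then [] else [c]) := by
  by_cases h0 : c = '.'
  · subst h0; decide
  by_cases h1 : c = ','
  · subst h1; decide
  by_cases h2 : c = '!'
  · subst h2; decide
  by_cases h3 : c = '<'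
  · subst h3; decide
  by_cases h4 : c = '>'
  · subst h4; decide
  by_cases h5 : c = '-'
  · subst h5; decide
  by_cases h6 : c = '"'
  · subst h6; decide
  by_cases h7 : c = '#'
  · subst h7; decide
  by_cases h8 : c = '$'
  · subst h8; decide
  by_cases h9 : c = '%'
  · subst h9; decide
  by_cases h10 : c = '&'
  · subst h10; decide
  by_cases h11 : c = '\''
  · subst h11; decide
  by_cases h12 : c = '('
  · subst h12; decide
  by_cases h13 : c = ')'
  · subst h13; decide
  by_cases h14 : c = '*'
  · subst h14; decide
  by_cases h15 : c = '+'
  · subst h15; decide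
  by_cases h16 : c = '/'
  · subst h16; decide
  by_cases h17 : c = ':'
  · subst h17; decide
  by_cases h18 : c = ';'
  · subst h18; decide
  by_cases h19 : c = '='
  · subst h19; decide
  by_cases h20 : c = '?'
  · subst h20; decide
  by_cases h21 : c = '@'
  · subst h21; decide
  by_cases h22 : c = '['
  · subst h22; decide
  by_cases h23 : c = '\\'
  · subst h23; decide
  by_cases h24 : c = ']'
  · subst h24; decide
  by_cases h25 : c = '^'
  · subst h25; decide
  by_cases h26 : c = '_'
  · subst h26; decide
  by_cases h27 : c = '`'
  · subst h27; decide
  by_cases h28 : c = '{'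
  · subst h28; decide
  by_cases h29 : c = '|'
  · subst h29; decide
  by_cases h30 : c = '}'
  · subst h30; decide
  by_cases h31 : c = '~'
  · subst h31; decide
  have e0 := beq_eq_false_iff_ne.mpr (Ne.symm h0)
  have e1 := beq_eq_false_iff_ne.mpr (Ne.symm h1)
  have e2 := beq_eq_false_iff_ne.mpr (Ne.symm h2)
  have e3 := beq_eq_false_iff_ne.mpr (Ne.symm h3)
  have e4 := beq_eq_false_iff_ne.mpr (Ne.symm h4)
  have e5 := beq_eq_false_iff_ne.mpr (Ne.symm h5)
  simp [pvChain, pvPairs, PySem.Dict.get?, List.find?, h0, h1, h2, h3, h4, h5, h6, h7, h8, h9, h10, h11, h12, h13, h14, h15, h16, h17, h18, h19, h20, h21, h22, h23, h24, h25, h26, h27, h28, h29, h30, h31, e0, e1, e2, e3, e4, e5]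

-- ===== VERDICT (by name: the statement is the Claim_ definition above) =====
set_option maxRecDepth 4000 in
lemma pv_pairs_ok :
    ([(".", " <.>"), (",", " <,>"), ("!", " <.>"), ("<", "<"), (">", ">"), ("-", " "),
      ("\"", ""), ("#", ""), ("$", ""), ("%", ""), ("&", ""), ("'", ""), ("(", ""), (")", ""),
      ("*", ""), ("+", ""), ("/", ""), (":", ""), (";", ""), ("=", ""), ("?", ""), ("@", ""),
      ("[", ""), ("\\", ""), ("]", ""), ("^", ""), ("_", ""), ("`", ""), ("{", ""), ("|", ""),
      ("}", ""), ("~", "")] : List (String × String)).map (fun pr => (pr.1.toList, pr.2.toList))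
      = pvPairs.map (fun pr => ([pr.1], pr.2)) := by decide

theorem fix_punctuation_spec : Claim_equal_fix_punctuation := by
  intro text _
  unfold Spec_fix_punctuation fix_punctuation fix_punctuation_alt
  apply String.toList_inj.mp
  rw [PySem.Str.toList_lower, PySem.Str.toList_lower, pv_items,
    pv_foldl_replace _ pvPairs pv_pairs_ok, String.toList_ofList]
  congr 1
  exact List.flatMap_congr (fun c _ => pv_pointwise c)
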